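-- pv_equiv track=rewrite | github.com/TianchenGuan/ComponentBench | scripts/difficulty_analysis.py | confusion_matrix_str
-- ===== SOURCE A (Python) =====
-- from collections import defaultdict
--
-- def confusion_matrix_str(y_true, y_pred, labels):
--     from collections import Counter
--     cm = defaultdict(lambda: defaultdict(int))
--     for t, p in zip(y_true, y_pred):
--         cm[t][p] += 1
--     header = "predicted→  " + "  ".join(f"{l:>6}" for l in labels)
--     lines = [header]
--     for tl in labels:
--         vals = "  ".join(f"{cm[tl][pl]:>6}" for pl in labels)
--         lines.append(f"{tl:>10}  {vals}")
--     return "\n".join(lines)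
-- ===== SOURCE B (Python) =====
-- def confusion_matrix_str(y_true, y_pred, labels):
--     # Staged per-row decomposition, no counting structure: for each true label
--     # filter out its predictions, then count each predicted label in that slice.
--     pairs = list(zip(y_true, y_pred))
--     header = "predicted\u2192  " + "  ".join(l.rjust(6) for l in labels)
--     rows = []
--     for tl in labels:
--         preds = [p for t, p in pairs if t == tl]
--         cells = "  ".join(str(preds.count(pl)).rjust(6) for pl in labels)
--         rows.append(tl.rjust(10) + "  " + cells)
--     return "\n".join([header] + rows)
-- ===== Notes on version B (the rewrite author's own statement) =====
-- stated objective: alternative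
-- what changed: Removes A's single counting pass and nested defaultdict entirely: B is staged per row - for each true label it filters that row's predictions out of the zipped pairs and then counts each predicted label in that slice with list.count, so no counting structure is ever built.
import Mathlib
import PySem

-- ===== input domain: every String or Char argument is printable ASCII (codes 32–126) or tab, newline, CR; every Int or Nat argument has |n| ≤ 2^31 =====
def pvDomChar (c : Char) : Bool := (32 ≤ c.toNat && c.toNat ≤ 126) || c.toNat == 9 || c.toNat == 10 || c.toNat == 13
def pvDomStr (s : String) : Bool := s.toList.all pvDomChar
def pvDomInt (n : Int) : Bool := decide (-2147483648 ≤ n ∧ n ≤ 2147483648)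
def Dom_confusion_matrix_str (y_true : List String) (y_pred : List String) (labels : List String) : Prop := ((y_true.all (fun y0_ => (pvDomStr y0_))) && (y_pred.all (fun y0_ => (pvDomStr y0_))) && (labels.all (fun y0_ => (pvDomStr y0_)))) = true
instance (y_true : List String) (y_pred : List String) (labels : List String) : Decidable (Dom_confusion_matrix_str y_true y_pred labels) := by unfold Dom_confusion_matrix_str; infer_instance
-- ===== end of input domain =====

-- B drops A's counting pass and nested defaultdict entirely: per true label it filters out that
-- row's predictions and counts each predicted label in that slice (staged filter+count; no count
-- structure is ever built).

-- f"{s:>w}" / str.rjust(w): right-justify with spaces (shared formatting helper of both ports)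
def pyRjust (s : String) (w : Nat) : String :=
  String.ofList (List.replicate (w - s.toList.length) ' ' ++ s.toList)

-- ===== PORT A =====
-- cm[t][p] += 1 on the defaultdict-of-defaultdicts
def cmStep (cm : PySem.Dict String (PySem.Dict String Int)) (tp : String × String) :
    PySem.Dict String (PySem.Dict String Int) :=
  let inner := cm.getD tp.1 PySem.Dict.empty
  cm.insert tp.1 (inner.insert tp.2 (inner.getD tp.2 0 + 1))

def confusion_matrix_str (y_true : List String) (y_pred : List String) (labels : List String) : String :=
  let cm := (y_true.zip y_pred).foldl cmStep PySem.Dict.empty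
  let header := "predicted→  " ++ PySem.Str.join "  " (labels.map (fun l => pyRjust l 6))
  let lines := header :: labels.map (fun tl =>
    let vals := PySem.Str.join "  " (labels.map (fun pl =>
      pyRjust (PySem.Int.toStr ((cm.getD tl PySem.Dict.empty).getD pl 0)) 6))
    pyRjust tl 10 ++ "  " ++ vals)
  PySem.Str.join "\n" lines

-- ===== PORT B =====
def confusion_matrix_str_alt (y_true : List String) (y_pred : List String) (labels : List String) : String :=
  let pairs := y_true.zip y_pred
  let header := "predicted→  " ++ PySem.Str.join "  " (labels.map (fun l => pyRjust l 6))
  let rows := labels.map (fun tl =>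
    -- preds = [p for t, p in pairs if t == tl]
    let preds := (pairs.filter (fun tp => tp.1 == tl)).map Prod.snd
    let cells := PySem.Str.join "  " (labels.map (fun pl =>
      pyRjust (PySem.Int.toStr ((PySem.List.count preds pl : Int))) 6))
    pyRjust tl 10 ++ "  " ++ cells)
  PySem.Str.join "\n" (header :: rows)

-- ===== PRECONDITION & SPEC =====
def Spec_confusion_matrix_str (y_true : List String) (y_pred : List String) (labels : List String) (out : String) : Prop := out = confusion_matrix_str_alt y_true y_pred labels
instance (y_true : List String) (y_pred : List String) (labels : List String) (out : String) : Decidable (Spec_confusion_matrix_str y_true y_pred labels out) := by unfold Spec_confusion_matrix_str; infer_instance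

-- ===== CLAIM (what is proved, stated in full; the proofs are below) =====
def Claim_equal_confusion_matrix_str : Prop := ∀ (y_true : List String) (y_pred : List String) (labels : List String), Dom_confusion_matrix_str y_true y_pred labels → Spec_confusion_matrix_str y_true y_pred labels (confusion_matrix_str y_true y_pred labels)

-- ===== LEMMAS AND PROOFS =====

-- A's count: the nested-dict fold counts exact pair matches
theorem countA (tl pl : String) : ∀ (ps : List (String × String)) (cm : PySem.Dict String (PySem.Dict String Int)),
    ((ps.foldl cmStep cm).getD tl PySem.Dict.empty).getD pl 0
      = (cm.getD tl PySem.Dict.empty).getD pl 0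
        + (ps.countP (fun tp => tp.1 == tl && tp.2 == pl) : Int) := by
  intro ps
  induction ps with
  | nil => intro cm; simp
  | cons tp ps ih =>
    intro cm
    simp only [List.foldl_cons, List.countP_cons, ih]
    unfold cmStep
    simp only [PySem.Dict.getD_insert]
    by_cases h1 : tl = tp.1 <;> by_cases h2 : pl = tp.2 <;>
      simp [h1, h2, PySem.Dict.getD_insert, beq_iff_eq] <;>
      first
        | omega
        | (intro h; exact h2 (h ▸ rfl))
        | (intro h; exact h1 (h ▸ rfl))
        | (intro h _; exact h1 (h ▸ rfl))

-- B's per-row count equals the count of exact pair matches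
theorem countRow (tl pl : String) (ps : List (String × String)) :
    PySem.List.count ((ps.filter (fun tp => tp.1 == tl)).map Prod.snd) pl
      = ps.countP (fun tp => tp.1 == tl && tp.2 == pl) := by
  rw [PySem.List.count_eq, List.count_eq_countP, List.countP_map, List.countP_filter]
  refine List.countP_congr ?_
  intro tp _
  simp only [Function.comp, Bool.and_eq_true]
  exact and_comm

-- ===== VERDICT (by name: the statement is the Claim_ definition above) =====
theorem confusion_matrix_str_spec : Claim_equal_confusion_matrix_str := by
  intro y_true y_pred labels _
  unfold Spec_confusion_matrix_str confusion_matrix_str confusion_matrix_str_alt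
  dsimp only
  refine congrArg (PySem.Str.join "\n") (congrArg (_ :: ·) (List.map_congr_left ?_))
  intro tl _
  refine congrArg (fun v : String => pyRjust tl 10 ++ "  " ++ v)
    (congrArg (PySem.Str.join "  ") (List.map_congr_left ?_))
  intro pl _
  rw [countA tl pl, countRow tl pl]
  simp
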